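-- pv_equiv track=rewrite | github.com/macthedev/Snap_Player_Stats | assets/data_parser.py | generate_card_unlock_history
-- ===== SOURCE A (Python) =====
-- def generate_card_unlock_history(cards):
-- 	# Number of columns
-- 	num_columns = 3
-- 	# Split cards into columns
-- 	columns = [[] for _ in range(num_columns)]
--
-- 	for i, card in enumerate(cards):
-- 		# Extract the card name and check if it is a favorite
-- 		card_name = card['Card'].get('Name', 'Unknown Card')
-- 		favorite = card['Card'].get('Favorite', False)
--
--         # Add HTML formatting for favorite cards
-- 		if favorite == 'Yes':
-- 			card_name = f'<div style="background-color: orange; padding: 5px; margin-bottom: 5px;">{card_name}</div>'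
-- 		else:
-- 			card_name = f'<div style="padding: 5px; margin-bottom: 5px;">{card_name}</div>'
--
-- 		if 'ArtVariantDefId' in card['Card']:
-- 			cardName = cardName + " Variant"
-- 		columns[i % num_columns].append(card_name)
--
--     # Create HTML for columns
-- 	html_columns = '<table style="width: 100%; border-collapse: collapse;"><tr>'
-- 	for col in columns:
-- 		html_columns += '<td class="variant-column" style="vertical-align: top; padding: 10px;">'
-- 		html_columns += "".join(col)  # Join with empty string as col now contains HTML divs
-- 		html_columns += '</td>'
-- 	html_columns += '</tr></table>'
--
-- 	return html_columns
-- ===== SOURCE B (Python) =====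
-- def generate_card_unlock_history(cards):
-- 	def fmt(card):
-- 		inner = card['Card']
-- 		name = inner.get('Name', 'Unknown Card')
-- 		if inner.get('Favorite', False) == 'Yes':
-- 			return f'<div style="background-color: orange; padding: 5px; margin-bottom: 5px;">{name}</div>'
-- 		return f'<div style="padding: 5px; margin-bottom: 5px;">{name}</div>'
--
-- 	body = ''.join(
-- 		'<td class="variant-column" style="vertical-align: top; padding: 10px;">'
-- 		+ ''.join(fmt(card) for card in cards[col::3])
-- 		+ '</td>'
-- 		for col in range(3)
-- 	)
-- 	return '<table style="width: 100%; border-collapse: collapse;"><tr>' + body + '</tr></table>'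
-- ===== Notes on version B (the rewrite author's own statement) =====
-- stated objective: alternative
-- what changed: B builds the table column-major, formatting each strided slice cards[col::3] directly into its <td>, instead of A's round-robin distribution of formatted cards into three intermediate lists followed by a separate join loop.
import Mathlib
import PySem

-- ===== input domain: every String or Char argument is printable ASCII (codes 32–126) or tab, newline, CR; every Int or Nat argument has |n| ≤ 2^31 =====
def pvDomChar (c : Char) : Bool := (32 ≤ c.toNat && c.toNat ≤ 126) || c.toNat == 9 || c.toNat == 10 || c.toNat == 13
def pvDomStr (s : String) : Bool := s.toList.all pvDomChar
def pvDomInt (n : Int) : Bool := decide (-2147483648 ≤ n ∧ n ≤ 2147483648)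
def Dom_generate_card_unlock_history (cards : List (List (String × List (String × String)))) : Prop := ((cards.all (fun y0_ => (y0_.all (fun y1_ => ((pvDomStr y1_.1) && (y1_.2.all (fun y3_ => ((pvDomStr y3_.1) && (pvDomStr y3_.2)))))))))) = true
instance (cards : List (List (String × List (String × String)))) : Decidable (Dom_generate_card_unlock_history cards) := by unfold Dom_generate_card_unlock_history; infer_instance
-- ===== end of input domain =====

-- ===== PORT A =====
-- Header: B builds the table column-major (formats cards[c::3] per column) instead of A's
-- round-robin distribution into three lists; same output, alternative decomposition.

-- A's per-element loop: round-robin append of the formatted card into one of three columns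
-- (`columns[i % 3].append(card_name)`).  The `if 'ArtVariantDefId' in card['Card']` branch
-- raises NameError in Python (undefined `cardName`); those inputs are excluded by Pre_,
-- so the port carries the branch with no effect.
def pvLoopA (cards : List (List (String × List (String × String)))) (i : Nat)
    (cols : List String × List String × List String) : List String × List String × List String :=
  match cards, cols with
  | [], cols => cols
  | card :: rest, (c0, c1, c2) =>
    let cardDict := PySem.Dict.ofList ((PySem.Dict.ofList card).getD "Card" [])
    let card_name := cardDict.getD "Name" "Unknown Card"
    let favorite := cardDict.get? "Favorite"   -- .get('Favorite', False): none plays False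
    let card_name :=
      if favorite == some "Yes" then
        "<div style=\"background-color: orange; padding: 5px; margin-bottom: 5px;\">" ++ card_name ++ "</div>"
      else
        "<div style=\"padding: 5px; margin-bottom: 5px;\">" ++ card_name ++ "</div>"
    -- `if 'ArtVariantDefId' in card['Card']: cardName = cardName + " Variant"` -- NameError, outside Pre_
    if i % 3 == 0 then pvLoopA rest (i + 1) (c0 ++ [card_name], c1, c2)
    else if i % 3 == 1 then pvLoopA rest (i + 1) (c0, c1 ++ [card_name], c2)
    else pvLoopA rest (i + 1) (c0, c1, c2 ++ [card_name])

def generate_card_unlock_history (cards : List (List (String × List (String × String)))) : String :=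
  let (c0, c1, c2) := pvLoopA cards 0 ([], [], [])
  let html_columns := "<table style=\"width: 100%; border-collapse: collapse;\"><tr>"
  let html_columns := [c0, c1, c2].foldl (fun h col =>
    h ++ "<td class=\"variant-column\" style=\"vertical-align: top; padding: 10px;\">"
      ++ PySem.Str.join "" col ++ "</td>") html_columns
  html_columns ++ "</tr></table>"

-- ===== PORT B =====
-- Source B's fmt helper
def pvFmtB (card : List (String × List (String × String))) : String :=
  let inner := PySem.Dict.ofList ((PySem.Dict.ofList card).getD "Card" [])
  let name := inner.getD "Name" "Unknown Card"
  if inner.get? "Favorite" == some "Yes" then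
    "<div style=\"background-color: orange; padding: 5px; margin-bottom: 5px;\">" ++ name ++ "</div>"
  else
    "<div style=\"padding: 5px; margin-bottom: 5px;\">" ++ name ++ "</div>"

def generate_card_unlock_history_alt (cards : List (List (String × List (String × String)))) : String :=
  let body := PySem.Str.join "" ((PySem.List.pyRange 0 3 1).map (fun col =>
    "<td class=\"variant-column\" style=\"vertical-align: top; padding: 10px;\">"
      ++ PySem.Str.join "" (((PySem.List.slice? cards (some col) none 3).getD []).map pvFmtB)
      ++ "</td>"))
  "<table style=\"width: 100%; border-collapse: collapse;\"><tr>" ++ body ++ "</tr></table>"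

-- ===== PRECONDITION & SPEC =====
-- Pre_ excludes exactly the inputs where A raises: a card without a 'Card' key (KeyError) or a
-- card whose 'Card' dict contains 'ArtVariantDefId' (NameError on the undefined `cardName`).
def Pre_generate_card_unlock_history (cards : List (List (String × List (String × String)))) : Prop :=
  ∀ card ∈ cards, (PySem.Dict.ofList card).contains "Card" = true ∧
    (PySem.Dict.ofList ((PySem.Dict.ofList card).getD "Card" [])).contains "ArtVariantDefId" = false
instance (cards : List (List (String × List (String × String)))) : Decidable (Pre_generate_card_unlock_history cards) := by unfold Pre_generate_card_unlock_history; infer_instance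
def pvWitness_generate_card_unlock_history : (List (List (String × List (String × String)))) :=
  [[("Card", [("Name", "A1"), ("Favorite", "Yes")])], [("Card", [("Name", "B1")])], [("Card", [])], [("Card", [("Name", "D"), ("Favorite", "No")])]]

def Spec_generate_card_unlock_history (cards : List (List (String × List (String × String)))) (out : String) : Prop := out = generate_card_unlock_history_alt cards
instance (cards : List (List (String × List (String × String)))) (out : String) : Decidable (Spec_generate_card_unlock_history cards out) := by unfold Spec_generate_card_unlock_history; infer_instance

-- ===== CLAIM (what is proved, stated in full; the proofs are below) =====
def Claim_equal_generate_card_unlock_history : Prop := ∀ (cards : List (List (String × List (String × String)))), Dom_generate_card_unlock_history cards → Pre_generate_card_unlock_history cards → Spec_generate_card_unlock_history cards (generate_card_unlock_history cards)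

-- ===== LEMMAS AND PROOFS =====

-- every third element of a list, starting with the first
def pvEvery3 {a : Type} : List a -> List a
  | [] => []
  | x :: t => x :: pvEvery3 (t.drop 2)
termination_by l => l.length
decreasing_by simp only [List.length_drop, List.length_cons]; omega

@[simp] theorem pvEvery3_nil {a : Type} : pvEvery3 ([] : List a) = [] := by rw [pvEvery3.eq_1]
@[simp] theorem pvEvery3_cons {a : Type} (x : a) (t : List a) :
    pvEvery3 (x :: t) = x :: pvEvery3 (t.drop 2) := by rw [pvEvery3.eq_2]

theorem pvStride_aux {a : Type} (l : List a) :
    List.filterMap (fun k => l[3 * k]?) (List.range ((l.length + 2) / 3)) = pvEvery3 l := by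
  match l with
  | [] => simp
  | x :: t =>
    have h1 : ((x :: t).length + 2) / 3 = ((t.drop 2).length + 2) / 3 + 1 := by
      simp only [List.length_cons, List.length_drop]; omega
    rw [h1, List.range_succ_eq_map, List.filterMap_cons, List.filterMap_map]
    have h2 : ∀ k : Nat, ((fun k => (x :: t)[3 * k]?) ∘ Nat.succ) k = (t.drop 2)[3 * k]? := by
      intro k
      have h3 : t.drop 2 = (x :: t).drop 3 := rfl
      simp only [Function.comp_apply, h3, List.getElem?_drop]
      congr 1
      omega
    rw [funext h2, pvStride_aux (t.drop 2)]
    simp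
termination_by l.length
decreasing_by simp only [List.length_drop, List.length_cons]; omega

theorem pvSlice_stride3 {a : Type} (l : List a) (c : Nat) :
    (PySem.List.slice? l (some (c : Int)) none 3).getD [] = pvEvery3 (l.drop c) := by
  have hc : ¬ ((c : Int) < 0) := by simp
  have hmin : min (c : Int) (l.length : Int) = ((min c l.length : Nat) : Int) := by push_cast; omega
  have hdrop : l.drop c = l.drop (min c l.length) := by
    rcases le_or_gt c l.length with h | h
    · rw [Nat.min_eq_left h]
    · rw [Nat.min_eq_right (le_of_lt h), List.drop_eq_nil_of_le (le_of_lt h), List.drop_length]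
  rw [hdrop, ← pvStride_aux (l.drop (min c l.length))]
  simp only [PySem.List.slice?, PySem.List.sliceIndices, if_neg hc]
  norm_num
  rw [hmin]
  have hfun : (fun x : Nat => l[(((min c l.length : Nat) : Int) + 3 * (x : Int)).toNat]?)
      = fun x : Nat => l[min c l.length + 3 * x]? := by
    funext x
    have e2 : (((min c l.length : Nat) : Int) + 3 * (x : Int)).toNat = min c l.length + 3 * x := by
      omega
    rw [e2]
  have hcnt : (if c < l.length then (((l.length : Int) - ((min c l.length : Nat) : Int) + 3 - 1) / 3).toNat else 0)
      = (l.length - min c l.length + 2) / 3 := by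
    rcases lt_or_ge c l.length with h | h
    · rw [if_pos h, Nat.min_eq_left (le_of_lt h)]
      have e : ((l.length : Int) - (c : Int) + 3 - 1) = ((l.length - c + 2 : Nat) : Int) := by omega
      rw [e, show ((3 : Int)) = ((3 : Nat) : Int) from rfl, ← Int.natCast_div, Int.toNat_natCast]
    · rw [if_neg (by omega), Nat.min_eq_right h]
      have e : l.length - l.length = 0 := by omega
      rw [e]
  rw [hfun, hcnt]

@[simp] theorem pvLoopA_nil (i : Nat) (c0 c1 c2 : List String) :
    pvLoopA [] i (c0, c1, c2) = (c0, c1, c2) := rfl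

theorem pvLoopA_cons (card : List (String × List (String × String)))
    (rest : List (List (String × List (String × String)))) (i : Nat) (c0 c1 c2 : List String) :
    pvLoopA (card :: rest) i (c0, c1, c2) =
      if i % 3 == 0 then pvLoopA rest (i + 1) (c0 ++ [pvFmtB card], c1, c2)
      else if i % 3 == 1 then pvLoopA rest (i + 1) (c0, c1 ++ [pvFmtB card], c2)
      else pvLoopA rest (i + 1) (c0, c1, c2 ++ [pvFmtB card]) := rfl

-- loop invariant for A's round-robin distribution: column k collects every third card from k on
theorem pvLoopA_spec (l : List (List (String × List (String × String)))) (i : Nat) (h : i % 3 = 0)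
    (c0 c1 c2 : List String) :
    pvLoopA l i (c0, c1, c2) =
      (c0 ++ (pvEvery3 l).map pvFmtB, c1 ++ (pvEvery3 (l.drop 1)).map pvFmtB,
        c2 ++ (pvEvery3 (l.drop 2)).map pvFmtB) := by
  match l with
  | [] => simp
  | [x] => simp [pvLoopA_cons, h]
  | [x, y] =>
    have h1 : (i + 1) % 3 = 1 := by omega
    simp [pvLoopA_cons, h, h1]
  | x :: y :: z :: t =>
    have h1 : (i + 1) % 3 = 1 := by omega
    have h2 : (i + 1 + 1) % 3 = 2 := by omega
    have h3 : (i + 1 + 1 + 1) % 3 = 0 := by omega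
    simp only [pvLoopA_cons, h, h1, h2]
    norm_num
    rw [pvLoopA_spec t (i + 1 + 1 + 1) h3]
    simp
termination_by l.length
decreasing_by simp only [List.length_cons]; omega

theorem pvJoin3 (x y z : String) : PySem.Str.join "" [x, y, z] = x ++ (y ++ z) := by
  simp [PySem.Str.join, PySem.Chars.join, List.intercalate, String.ofList_append, String.ofList_toList]

-- ===== VERDICT (by name: the statement is the Claim_ definition above) =====
set_option maxRecDepth 65536 in
theorem generate_card_unlock_history_spec : Claim_equal_generate_card_unlock_history := by
  intro cards _ _
  unfold Spec_generate_card_unlock_history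
  unfold generate_card_unlock_history generate_card_unlock_history_alt
  rw [pvLoopA_spec cards 0 rfl [] [] []]
  have hr : PySem.List.pyRange 0 3 1 = [0, 1, 2] := by decide
  rw [hr]
  simp only [List.map_cons, List.map_nil, List.foldl_cons, List.foldl_nil, List.nil_append]
  rw [show ((0 : Int)) = ((0 : Nat) : Int) from rfl, show ((1 : Int)) = ((1 : Nat) : Int) from rfl,
      show ((2 : Int)) = ((2 : Nat) : Int) from rfl]
  rw [pvSlice_stride3 cards 0, pvSlice_stride3 cards 1, pvSlice_stride3 cards 2]
  rw [pvJoin3]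
  apply String.toList_inj.mp
  simp [String.toList_append]
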